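-- pv_equiv track=rewrite | github.com/Trisstenyay/python-syntax-practice | 34_same_frequency/same_frequency.py | same_frequency
-- ===== SOURCE A (Python) =====
-- def same_frequency(num1, num2):
--     """Do these nums have same frequencies of digits?
--
--         >>> same_frequency(551122, 221515)
--         True
--
--         >>> same_frequency(321142, 3212215)
--         False
--
--         >>> same_frequency(1212, 2211)
--         True
--     """
--     num1_str = str(num1)
--     num2_str = str(num2)
--
--     if len(num1_str) != len(num2_str):
--         return False
--
--     freq1 = {} # create a dictionary to store frequency of digits in num1
--     freq2 = {} # create a dictionary to store frequency of digits in num2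
--
--     for digit in num1_str: # loop through each digit in num1_str
--         freq1[digit] = freq1.get(digit, 0) + 1 # count frequency of each digit
--
--     for digit in num2_str:  # Loop through each digit in num2_str
--         freq2[digit] = freq2.get(digit, 0) + 1  # Count frequency of each digit
--
--     return freq1 == freq2  # Return True if the two dictionaries are equal
-- ===== SOURCE B (Python) =====
-- def same_frequency(num1, num2):
--     return sorted(str(num1)) == sorted(str(num2))
-- ===== Notes on version B (the rewrite author's own statement) =====
-- stated objective: simpler
-- what changed: Replaces the length guard plus two frequency dictionaries and their map comparison by a one-line canonicalization: sort the characters of each str(num) and compare the sorted sequences.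
import Mathlib
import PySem

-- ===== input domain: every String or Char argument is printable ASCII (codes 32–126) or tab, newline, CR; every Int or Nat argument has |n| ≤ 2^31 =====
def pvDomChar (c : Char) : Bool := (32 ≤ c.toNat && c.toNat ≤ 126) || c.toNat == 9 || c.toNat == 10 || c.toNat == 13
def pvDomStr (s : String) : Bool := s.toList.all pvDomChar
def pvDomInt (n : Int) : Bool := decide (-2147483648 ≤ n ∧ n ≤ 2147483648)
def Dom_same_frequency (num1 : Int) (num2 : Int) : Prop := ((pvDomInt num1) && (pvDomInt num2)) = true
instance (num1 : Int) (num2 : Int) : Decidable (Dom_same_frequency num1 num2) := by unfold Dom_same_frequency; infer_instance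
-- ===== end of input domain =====

-- B replaces A's two frequency dictionaries with a one-line sort-and-compare canonicalization (simpler).


-- ===== PORT A =====
-- Python's dict == ignores insertion order: same size and every key-value of d1 looked up in d2
def pyDictEq (d1 d2 : PySem.Dict Char Int) : Bool :=
  d1.size == d2.size && d1.items.all (fun p => d2.get? p.1 == some p.2)

def same_frequency (num1 : Int) (num2 : Int) : Bool :=
  let num1_str := PySem.Int.toChars num1
  let num2_str := PySem.Int.toChars num2
  if num1_str.length ≠ num2_str.length then false
  else
    let freq1 := num1_str.foldl (fun d c => d.insert c (d.getD c 0 + 1)) PySem.Dict.empty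
    let freq2 := num2_str.foldl (fun d c => d.insert c (d.getD c 0 + 1)) PySem.Dict.empty
    pyDictEq freq1 freq2

-- ===== PORT B =====
def same_frequency_alt (num1 : Int) (num2 : Int) : Bool :=
  PySem.List.sorted (PySem.Int.toChars num1) (fun c => c) ==
  PySem.List.sorted (PySem.Int.toChars num2) (fun c => c)

-- ===== PRECONDITION & SPEC =====
def Spec_same_frequency (num1 : Int) (num2 : Int) (out : Bool) : Prop := out = same_frequency_alt num1 num2
instance (num1 : Int) (num2 : Int) (out : Bool) : Decidable (Spec_same_frequency num1 num2 out) := by unfold Spec_same_frequency; infer_instance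

-- ===== CLAIM (what is proved, stated in full; the proofs are below) =====
def Claim_equal_same_frequency : Prop := ∀ (num1 : Int) (num2 : Int), Dom_same_frequency num1 num2 → Spec_same_frequency num1 num2 (same_frequency num1 num2)

-- ===== LEMMAS AND PROOFS =====

-- Python's unordered dict == on the two counters decides permutation of the underlying lists
lemma pyDictEq_counter_iff (s1 s2 : List Char) :
    pyDictEq (PySem.Dict.counter s1) (PySem.Dict.counter s2) = true ↔ s1.Perm s2 := by
  unfold pyDictEq
  rw [Bool.and_eq_true, beq_iff_eq, List.all_eq_true]
  constructor
  · rintro ⟨hsz, hall⟩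
    have hsz' : (PySem.Set.ofList s1).length = (PySem.Set.ofList s2).length := by
      simpa [PySem.Dict.size, PySem.Dict.items_counter] using hsz
    have hget : ∀ k ∈ PySem.Set.ofList s1,
        (PySem.Dict.counter s2).get? k = some ((s1.count k : Int)) := by
      intro k hk
      have := hall (k, (s1.count k : Int))
        (by rw [PySem.Dict.items_counter]; exact List.mem_map.mpr ⟨k, hk, rfl⟩)
      simpa using this
    have hsub : PySem.Set.ofList s1 ⊆ PySem.Set.ofList s2 := by
      intro k hk
      have hc : (PySem.Dict.counter s2).contains k = true := by
        rw [PySem.Dict.contains_eq_isSome_get?, hget k hk]; rfl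
      rw [PySem.Dict.contains_counter] at hc
      exact (PySem.Set.mem_ofList s2 k).mpr (List.contains_iff_mem.mp hc)
    have hperm : (PySem.Set.ofList s1).Perm (PySem.Set.ofList s2) :=
      List.Subperm.perm_of_length_le
        ((PySem.Set.nodup_ofList s1).subperm hsub) (le_of_eq hsz'.symm)
    rw [List.perm_iff_count]
    intro a
    by_cases ha : a ∈ s1
    · have hg := hget a ((PySem.Set.mem_ofList s1 a).mpr ha)
      have := PySem.Dict.getD_of_get?_eq_some (PySem.Dict.counter s2) 0 hg
      rw [PySem.Dict.getD_counter] at this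
      exact_mod_cast this.symm
    · have ha2 : a ∉ s2 := by
        intro h2
        exact ha ((PySem.Set.mem_ofList s1 a).mp
          (hperm.mem_iff.mpr ((PySem.Set.mem_ofList s2 a).mpr h2)))
      rw [List.count_eq_zero_of_not_mem ha, List.count_eq_zero_of_not_mem ha2]
  · intro hperm
    have hsets : (PySem.Set.ofList s1).Perm (PySem.Set.ofList s2) :=
      (List.perm_ext_iff_of_nodup (PySem.Set.nodup_ofList s1)
        (PySem.Set.nodup_ofList s2)).mpr (fun x => by
          rw [PySem.Set.mem_ofList, PySem.Set.mem_ofList]; exact hperm.mem_iff)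
    refine ⟨?_, ?_⟩
    · simp [PySem.Dict.size, PySem.Dict.items_counter, hsets.length_eq]
    · intro p hp
      rw [PySem.Dict.items_counter] at hp
      obtain ⟨k, hk, rfl⟩ := List.mem_map.mp hp
      have hk2 : k ∈ s2 := hperm.mem_iff.mp ((PySem.Set.mem_ofList s1 k).mp hk)
      have hc : (PySem.Dict.counter s2).contains k = true := by
        rw [PySem.Dict.contains_counter]; exact List.contains_iff_mem.mpr hk2
      rw [PySem.Dict.contains_eq_isSome_get?] at hc
      obtain ⟨v, hv⟩ := Option.isSome_iff_exists.mp hc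
      have hgd := PySem.Dict.getD_of_get?_eq_some (PySem.Dict.counter s2) 0 hv
      rw [PySem.Dict.getD_counter] at hgd
      have : v = (s1.count k : Int) := by
        rw [← hgd]; exact_mod_cast congrArg Nat.cast ((List.perm_iff_count.mp hperm k).symm)
      simp [hv, this]

lemma main_lemma (s1 s2 : List Char) :
    (if s1.length ≠ s2.length then false
     else pyDictEq (s1.foldl (fun d c => d.insert c (d.getD c 0 + 1)) PySem.Dict.empty)
                   (s2.foldl (fun d c => d.insert c (d.getD c 0 + 1)) PySem.Dict.empty))
    = (PySem.List.sorted s1 (fun c => c) == PySem.List.sorted s2 (fun c => c)) := by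
  rw [PySem.Dict.foldl_insert_getD_add_one_eq_counter,
      PySem.Dict.foldl_insert_getD_add_one_eq_counter]
  by_cases hlen : s1.length = s2.length
  · simp only [hlen, ne_eq, not_true_eq_false, if_false]
    rcases Bool.eq_false_or_eq_true
      (PySem.List.sorted s1 (fun c => c) == PySem.List.sorted s2 (fun c => c)) with hb | hb
    · rw [hb]
      rw [beq_iff_eq] at hb
      exact (pyDictEq_counter_iff s1 s2).mpr
        ((PySem.List.sorted_id_eq_sorted_id_iff_perm s1 s2).mp hb)
    · rw [hb]
      rw [beq_eq_false_iff_ne] at hb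
      by_contra hne
      exact hb ((PySem.List.sorted_id_eq_sorted_id_iff_perm s1 s2).mpr
        ((pyDictEq_counter_iff s1 s2).mp (by simpa using hne)))
  · simp only [hlen, ne_eq, not_false_eq_true, if_true]
    symm
    rw [beq_eq_false_iff_ne]
    intro heq
    exact hlen ((PySem.List.sorted_id_eq_sorted_id_iff_perm s1 s2).mp heq).length_eq

-- ===== VERDICT (by name: the statement is the Claim_ definition above) =====
theorem same_frequency_spec : Claim_equal_same_frequency := by
  intro num1 num2 _
  unfold Spec_same_frequency same_frequency same_frequency_alt
  exact main_lemma _ _
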